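-- pv_equiv track=rewrite | github.com/MariiaNikitash/DSA | CodePath_TIP103/arrays/sesh1.py | wealthiest_customer
-- ===== SOURCE A (Python) =====
-- def wealthiest_customer(accounts):
-- 	# interate over account indexes
-- 	    # iterate over each $ in each account to sum the sum
--         # total =
--     # return [acount[i], best]
--     best_index = 0
--     best_sum = sum(accounts[0])
--
--     for index, account in enumerate(accounts[1:], start=1):
--         cur = sum(account)
--         if best_sum < cur:
--             best_sum = cur
--             best_index = index
--     return [best_index, best_sum]
-- ===== SOURCE B (Python) =====
-- def wealthiest_customer(accounts):
--     sums = [sum(a) for a in accounts]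
--     best = max(sums)
--     return [sums.index(best), best]
-- ===== Notes on version B (the rewrite author's own statement) =====
-- stated objective: simpler
-- what changed: Replaces the running-best loop with explicit enumerate over the tail by a sums table followed by separate max() and .index() lookups (first-maximum tie-break preserved).
-- outside the precondition, e.g. on wealthiest_customer([]): A raises IndexError, B raises ValueError
import Mathlib
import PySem

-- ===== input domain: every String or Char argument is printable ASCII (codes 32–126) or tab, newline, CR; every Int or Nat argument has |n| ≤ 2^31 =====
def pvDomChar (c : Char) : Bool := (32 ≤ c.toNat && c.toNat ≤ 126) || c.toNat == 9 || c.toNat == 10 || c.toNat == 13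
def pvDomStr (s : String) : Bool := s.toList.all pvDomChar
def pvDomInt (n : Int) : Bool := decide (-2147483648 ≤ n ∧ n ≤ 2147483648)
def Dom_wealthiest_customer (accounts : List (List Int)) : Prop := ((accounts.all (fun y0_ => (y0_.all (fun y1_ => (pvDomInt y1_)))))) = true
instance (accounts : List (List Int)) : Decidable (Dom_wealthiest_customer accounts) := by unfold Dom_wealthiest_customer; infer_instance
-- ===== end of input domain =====

-- B replaces A's single running-best loop by a sums table plus max() and .index() lookups; objective: simpler.

-- ===== PORT A =====
-- literal port of A: best over enumerate(accounts[1:], start=1), starting from sum(accounts[0])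
def wealthiest_customer (accounts : List (List Int)) : List Int :=
  let best_sum0 : Int := (PySem.List.pyGetD accounts 0 []).sum
  let r :=
    (PySem.List.enumerate (PySem.List.slice accounts (some 1) none) 1).foldl
      (fun (st : Int × Int) p =>
        let cur := p.2.sum
        if st.2 < cur then (p.1, cur) else st)
      (0, best_sum0)
  [r.1, r.2]

-- ===== PORT B =====
def wealthiest_customer_alt (accounts : List (List Int)) : List Int :=
  let sums := accounts.map List.sum
  let best := (PySem.List.max? sums (fun x => x)).getD 0
  [((PySem.List.index? sums best).getD 0 : Int), best]

-- ===== PRECONDITION & SPEC =====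
-- Pre_ excludes the empty list: there A raises IndexError (accounts[0]) and B raises ValueError (max([])).
def Pre_wealthiest_customer (accounts : List (List Int)) : Prop := accounts ≠ []
instance (accounts : List (List Int)) : Decidable (Pre_wealthiest_customer accounts) := by unfold Pre_wealthiest_customer; infer_instance
def pvWitness_wealthiest_customer : List (List Int) := [[1, 2], [3]]

def Spec_wealthiest_customer (accounts : List (List Int)) (out : List Int) : Prop := out = wealthiest_customer_alt accounts
instance (accounts : List (List Int)) (out : List Int) : Decidable (Spec_wealthiest_customer accounts out) := by unfold Spec_wealthiest_customer; infer_instance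

-- ===== CLAIM (what is proved, stated in full; the proofs are below) =====
def Claim_equal_wealthiest_customer : Prop := ∀ (accounts : List (List Int)), Dom_wealthiest_customer accounts → Pre_wealthiest_customer accounts → Spec_wealthiest_customer accounts (wealthiest_customer accounts)

-- ===== LEMMAS AND PROOFS =====

-- all elements ≤ bs ↔ the running max stays bs
theorem foldl_max_eq_self_iff (l : List Int) (bs : Int) :
    l.foldl max bs = bs ↔ ∀ x ∈ l, x ≤ bs := by
  constructor
  · intro h x hx
    have := (PySem.List.le_foldl_max l bs).2 x hx
    omega
  · intro h
    rcases PySem.List.foldl_max_mem l bs with h1 | h1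
    · exact h1
    · have h2 := (PySem.List.le_foldl_max l bs).1
      have h3 := h _ h1
      omega

-- A's loop body with sums taken inside equals the same loop over the list of sums
theorem fuse_sum (l : List (List Int)) : ∀ (k : Int) (st : Int × Int),
    (PySem.List.enumerate l k).foldl
      (fun (st : Int × Int) p =>
        let cur := p.2.sum
        if st.2 < cur then (p.1, cur) else st) st
    = (PySem.List.enumerate (l.map List.sum) k).foldl
      (fun (st : Int × Int) p => if st.2 < p.2 then (p.1, p.2) else st) st := by
  induction l with
  | nil => intro k st; simp [PySem.List.enumerate_nil]
  | cons x l ih =>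
      intro k st
      simp only [List.map_cons, PySem.List.enumerate_cons, List.foldl_cons]
      exact ih (k + 1) _

-- characterisation of A's running-best loop over enumerate l k: the result is
-- (first index of the overall max offset by k, overall max), with bi kept on no strict improvement
theorem core_loop (l : List Int) : ∀ (k bi bs : Int),
    (PySem.List.enumerate l k).foldl
      (fun (st : Int × Int) p => if st.2 < p.2 then (p.1, p.2) else st) (bi, bs)
    = (if ∀ x ∈ l, x ≤ bs then bi
       else k + (((PySem.List.index? l (l.foldl max bs)).getD 0 : Nat) : Int),
       l.foldl max bs) := by
  induction l with
  | nil => intro k bi bs; simp [PySem.List.enumerate_nil]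
  | cons x l ih =>
      intro k bi bs
      simp only [PySem.List.enumerate_cons, List.foldl_cons]
      by_cases hx : bs < x
      · rw [if_pos (by simp [hx])]
        rw [ih (k + 1) k x]
        have hmax : max bs x = x := by omega
        rw [hmax]
        have hcond : ¬ ∀ y ∈ x :: l, y ≤ bs := by
          intro h; have := h x (List.mem_cons_self); omega
        rw [if_neg hcond]
        by_cases hall : ∀ y ∈ l, y ≤ x
        · have hMx : l.foldl max x = x := (foldl_max_eq_self_iff l x).2 hall
          rw [if_pos hall, hMx, PySem.List.index?_cons_self]
          simp
        · rw [if_neg hall]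
          obtain ⟨y, hy, hyx⟩ := not_forall₂.1 hall
          have hyM := (PySem.List.le_foldl_max l x).2 y hy
          have hMl : l.foldl max x ∈ l := by
            rcases PySem.List.foldl_max_mem l x with h1 | h1
            · omega
            · exact h1
          obtain ⟨j, hj⟩ := Option.isSome_iff_exists.1
            ((PySem.List.index?_isSome_iff l _).2 hMl)
          have hne : x ≠ l.foldl max x := by omega
          rw [PySem.List.index?_cons_of_ne l hne, hj]
          simp only [Option.map_some, Option.getD_some, Prod.mk.injEq]
          refine ⟨by push_cast; ring, trivial⟩
      · rw [if_neg (by simpa using hx)]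
        rw [ih (k + 1) bi bs]
        have hmax : max bs x = bs := by omega
        rw [hmax]
        by_cases hall : ∀ y ∈ l, y ≤ bs
        · have hcond : ∀ y ∈ x :: l, y ≤ bs := by
            intro y hy
            rcases List.mem_cons.1 hy with rfl | hy'
            · omega
            · exact hall y hy'
          rw [if_pos hall, if_pos hcond]
        · have hcond : ¬ ∀ y ∈ x :: l, y ≤ bs := by
            intro h; exact hall (fun y hy => h y (List.mem_cons_of_mem x hy))
          rw [if_neg hall, if_neg hcond]
          obtain ⟨y, hy, hyx⟩ := not_forall₂.1 hall
          have hyM := (PySem.List.le_foldl_max l bs).2 y hy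
          have hMl : l.foldl max bs ∈ l := by
            rcases PySem.List.foldl_max_mem l bs with h1 | h1
            · omega
            · exact h1
          obtain ⟨j, hj⟩ := Option.isSome_iff_exists.1
            ((PySem.List.index?_isSome_iff l _).2 hMl)
          have hne : x ≠ l.foldl max bs := by omega
          rw [PySem.List.index?_cons_of_ne l hne, hj]
          simp only [Option.map_some, Option.getD_some, Prod.mk.injEq]
          refine ⟨by push_cast; ring, trivial⟩

-- ===== VERDICT (by name: the statement is the Claim_ definition above) =====
theorem wealthiest_customer_spec : Claim_equal_wealthiest_customer := by
  intro accounts _ hpre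
  unfold Spec_wealthiest_customer wealthiest_customer wealthiest_customer_alt
  obtain ⟨a, rest, rfl⟩ : ∃ a rest, accounts = a :: rest :=
    match accounts, hpre with
    | x :: xs, _ => ⟨x, xs, rfl⟩
  have hget : PySem.List.pyGetD (a :: rest) 0 [] = a := by
    simp [PySem.List.pyGetD, PySem.List.pyIdx?, PySem.List.pyGet?]
  simp only [hget, PySem.List.slice_from_one, List.tail_cons]
  rw [fuse_sum, core_loop]
  simp only [List.map_cons, PySem.List.max?_id_cons, Option.getD_some]
  set l := rest.map List.sum with hl
  by_cases hall : ∀ x ∈ l, x ≤ a.sum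
  · rw [if_pos hall]
    have hM : l.foldl max a.sum = a.sum := (foldl_max_eq_self_iff _ _).2 hall
    rw [hM, PySem.List.index?_cons_self]
    simp
  · rw [if_neg hall]
    obtain ⟨y, hy, hyx⟩ := not_forall₂.1 hall
    have hyM := (PySem.List.le_foldl_max l a.sum).2 y hy
    have hMl : l.foldl max a.sum ∈ l := by
      rcases PySem.List.foldl_max_mem l a.sum with h1 | h1
      · omega
      · exact h1
    obtain ⟨j, hj⟩ := Option.isSome_iff_exists.1 ((PySem.List.index?_isSome_iff l _).2 hMl)
    have hne : a.sum ≠ l.foldl max a.sum := by omega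
    rw [PySem.List.index?_cons_of_ne l hne, hj]
    simp only [Option.map_some, Option.getD_some, List.cons.injEq]
    refine ⟨by push_cast; ring, trivial⟩
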